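-- pv_equiv track=rewrite | github.com/kim-hyunjin/learning-code-archive | algorithms/python-quiz/udemy/baekjoon_quiz/greedy/quiz_1449.py | solution
-- ===== SOURCE A (Python) =====
-- def solution(tapeSize, leakedPositions):
--     leakedPositions.sort()
--
--     before = leakedPositions[0]
--     usedTape = 1
--     covered = 1
--     for i in range(1, len(leakedPositions)):
--         diff = leakedPositions[i] - before
--         if diff + covered <= tapeSize:
--             covered += diff
--         else:
--             usedTape += 1
--             covered = 1
--         before = leakedPositions[i]
--
--
--     return usedTape
-- ===== SOURCE B (Python) =====
-- def solution(tapeSize, leakedPositions):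
--     # Same in-place sort side effect as A; equivalence claim is about the return value.
--     leakedPositions.sort()
--     count = 0
--     ps = leakedPositions
--     while ps:
--         end = ps[0] + tapeSize - 1
--         count += 1
--         ps = [p for p in ps[1:] if p > end]
--     return count
-- ===== Notes on version B (the rewrite author's own statement) =====
-- stated objective: alternative
-- what changed: Replaces A's single-pass before/covered difference accumulation with a staged peel-off loop: repeatedly take the first remaining sorted position, lay one tape ending at p+tapeSize-1, and rebuild the remaining list by filtering out everything that tape covers; the count of peeling rounds is the answer.
-- outside the precondition, e.g. on solution(5, []): A raises IndexError, B returns 0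
import Mathlib
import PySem

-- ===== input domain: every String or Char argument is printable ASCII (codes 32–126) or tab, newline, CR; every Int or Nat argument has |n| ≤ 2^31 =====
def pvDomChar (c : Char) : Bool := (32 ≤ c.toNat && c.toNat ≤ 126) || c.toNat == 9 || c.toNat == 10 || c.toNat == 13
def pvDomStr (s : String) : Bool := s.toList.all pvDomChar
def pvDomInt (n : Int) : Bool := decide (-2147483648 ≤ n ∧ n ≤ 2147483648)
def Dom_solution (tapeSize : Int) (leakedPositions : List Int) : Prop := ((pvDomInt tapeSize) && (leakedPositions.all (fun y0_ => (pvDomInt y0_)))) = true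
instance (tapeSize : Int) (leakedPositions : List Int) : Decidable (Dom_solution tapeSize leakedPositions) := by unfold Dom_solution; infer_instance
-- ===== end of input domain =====

-- B replaces A's single-pass before/covered accumulation with a staged peel-off loop
-- (lay one tape at the first remaining sorted position, filter out what it covers, repeat).
-- A sorts leakedPositions in place; the equivalence proved here is about the return value.

-- ===== PORT A =====
-- the for-loop over range(1, len): before/usedTape/covered state, iterating the tail
def solutionLoopA (tapeSize : Int) : List Int → Int → Int → Int → Int
  | [], _, usedTape, _ => usedTape
  | p :: rest, before, usedTape, covered =>
      let diff := p - before
      if diff + covered ≤ tapeSize then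
        solutionLoopA tapeSize rest p usedTape (covered + diff)
      else
        solutionLoopA tapeSize rest p (usedTape + 1) 1

def solution (tapeSize : Int) (leakedPositions : List Int) : Int :=
  match PySem.List.sorted leakedPositions (fun x => x) false with
  | [] => 0      -- leakedPositions[0] raises IndexError in Python; excluded by Pre_solution
  | b :: rest => solutionLoopA tapeSize rest b 1 1

-- ===== PORT B =====
-- the while loop: peel one tape per round, rebuilding the remaining list by a filter
def solutionLoopB (tapeSize : Int) : List Int → Int → Int
  | [], count => count
  | x :: xs, count =>
      solutionLoopB tapeSize (xs.filter (fun p => decide (x + tapeSize - 1 < p))) (count + 1)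
termination_by l _ => l.length
decreasing_by
  refine Nat.lt_succ_of_le ?_
  simp only [List.length_unattach]
  exact le_trans (List.length_filter_le _ _) (le_of_eq List.length_attach)

def solution_alt (tapeSize : Int) (leakedPositions : List Int) : Int :=
  solutionLoopB tapeSize (PySem.List.sorted leakedPositions (fun x => x) false) 0

-- ===== PRECONDITION & SPEC =====
-- A raises IndexError on the empty list (leakedPositions[0]); those inputs are excluded (B returns 0).
def Pre_solution (tapeSize : Int) (leakedPositions : List Int) : Prop := leakedPositions ≠ []
instance (tapeSize : Int) (leakedPositions : List Int) : Decidable (Pre_solution tapeSize leakedPositions) := by unfold Pre_solution; infer_instance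
def pvWitness_solution : Int × List Int := (3, [1, 5, 2])

def Spec_solution (tapeSize : Int) (leakedPositions : List Int) (out : Int) : Prop := out = solution_alt tapeSize leakedPositions
instance (tapeSize : Int) (leakedPositions : List Int) (out : Int) : Decidable (Spec_solution tapeSize leakedPositions out) := by unfold Spec_solution; infer_instance

-- ===== CLAIM (what is proved, stated in full; the proofs are below) =====
def Claim_equal_solution : Prop := ∀ (tapeSize : Int) (leakedPositions : List Int), Dom_solution tapeSize leakedPositions → Pre_solution tapeSize leakedPositions → Spec_solution tapeSize leakedPositions (solution tapeSize leakedPositions)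

-- ===== LEMMAS AND PROOFS =====

theorem loopB_nil (ts count : Int) : solutionLoopB ts [] count = count := by
  simp [solutionLoopB]

theorem loopB_cons (ts x count : Int) (xs : List Int) :
    solutionLoopB ts (x :: xs) count
      = solutionLoopB ts (xs.filter (fun p => decide (x + ts - 1 < p))) (count + 1) := by
  rw [solutionLoopB]

-- The key invariant: on a sorted tail l whose elements all lie at or above `before`,
-- A's loop with state (before, u, c) equals B's peel loop started on l with the
-- positions covered by the current tape (those ≤ before + tapeSize - c) filtered away.
theorem loopA_eq_loopB (ts : Int) (l : List Int) :
    ∀ (b u c : Int), l.Pairwise (· ≤ ·) → (∀ p ∈ l, b ≤ p) → 1 ≤ c →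
      solutionLoopA ts l b u c
        = solutionLoopB ts (l.filter (fun p => decide (b + ts - c < p))) u := by
  induction l with
  | nil => intro b u c _ _ _; simp [solutionLoopA, loopB_nil]
  | cons p t ih =>
    intro b u c hpair hge hc
    have hpt : ∀ q ∈ t, p ≤ q := (List.pairwise_cons.mp hpair).1
    have htp : t.Pairwise (· ≤ ·) := (List.pairwise_cons.mp hpair).2
    have hbp : b ≤ p := hge p (List.mem_cons_self ..)
    simp only [solutionLoopA, List.filter_cons]
    by_cases h : p - b + c ≤ ts
    · rw [if_pos h]
      have hdrop : (decide (b + ts - c < p)) = false := by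
        simp only [decide_eq_false_iff_not, not_lt]; omega
      rw [hdrop]
      have := ih p u (c + (p - b)) htp hpt (by omega)
      rw [this]
      congr 1
      apply List.filter_congr
      intro x _
      have : p + ts - (c + (p - b)) = b + ts - c := by omega
      rw [this]
    · rw [if_neg h]
      have hkeep : (decide (b + ts - c < p)) = true := by
        simp only [decide_eq_true_eq]; omega
      rw [hkeep, if_pos rfl, loopB_cons]
      rw [ih p (u + 1) 1 htp hpt le_rfl]
      congr 1
      rw [List.filter_filter]
      apply List.filter_congr
      intro x hx
      have hpx : p ≤ x := hpt x hx
      by_cases h2 : p + ts - 1 < x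
      · have hb : b + ts - c < x := by omega
        simp [h2, hb]
      · simp [h2]

theorem solution_eq_alt (tapeSize : Int) (leakedPositions : List Int)
    (h : leakedPositions ≠ []) :
    solution tapeSize leakedPositions = solution_alt tapeSize leakedPositions := by
  unfold solution solution_alt
  rcases hs : PySem.List.sorted leakedPositions (fun x => x) false with _ | ⟨b, rest⟩
  · exact absurd ((PySem.List.sorted_eq_nil_iff _ _ _).mp hs) h
  · have hpair : (b :: rest).Pairwise (fun a c : Int => a ≤ c) := by
      have := PySem.List.sorted_pairwise (xs := leakedPositions) (key := fun x : Int => x)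
      rw [hs] at this; exact this
    have hpt : ∀ q ∈ rest, b ≤ q := (List.pairwise_cons.mp hpair).1
    have htp : rest.Pairwise (· ≤ ·) := (List.pairwise_cons.mp hpair).2
    rw [loopB_cons]
    exact loopA_eq_loopB tapeSize rest b 1 1 htp hpt le_rfl

-- ===== VERDICT (by name: the statement is the Claim_ definition above) =====
theorem solution_spec : Claim_equal_solution := by
  intro tapeSize leakedPositions _ hpre
  exact solution_eq_alt tapeSize leakedPositions hpre
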